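-- pv_equiv track=rewrite | github.com/Gyeong-Hyeon/coding_test | vernect/q1.py | cutThemAll
-- ===== SOURCE A (Python) =====
-- def cutThemAll(lengths, minLength):
--     while len(lengths) > 1:
--         if sum(lengths) < minLength:
--             return "Impossible"
--
--         if lengths[0] < lengths[-1]:
--             lengths.pop(0)
--         else:
--             lengths.pop()
--     return "Possible"
-- ===== SOURCE B (Python) =====
-- def cutThemAll(lengths, minLength):
--     i, j = 0, len(lengths) - 1
--     s = sum(lengths)
--     while i < j:
--         if s < minLength:
--             return "Impossible"
--         if lengths[i] < lengths[j]:
--             s -= lengths[i]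
--             i += 1
--         else:
--             s -= lengths[j]
--             j -= 1
--     return "Possible"
-- ===== Notes on version B (the rewrite author's own statement) =====
-- stated objective: faster
-- what changed: Replaces the destructive pop-loop that re-sums the whole list each iteration with two pointers and a running sum decremented by the popped value (no mutation of the input).
import Mathlib
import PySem

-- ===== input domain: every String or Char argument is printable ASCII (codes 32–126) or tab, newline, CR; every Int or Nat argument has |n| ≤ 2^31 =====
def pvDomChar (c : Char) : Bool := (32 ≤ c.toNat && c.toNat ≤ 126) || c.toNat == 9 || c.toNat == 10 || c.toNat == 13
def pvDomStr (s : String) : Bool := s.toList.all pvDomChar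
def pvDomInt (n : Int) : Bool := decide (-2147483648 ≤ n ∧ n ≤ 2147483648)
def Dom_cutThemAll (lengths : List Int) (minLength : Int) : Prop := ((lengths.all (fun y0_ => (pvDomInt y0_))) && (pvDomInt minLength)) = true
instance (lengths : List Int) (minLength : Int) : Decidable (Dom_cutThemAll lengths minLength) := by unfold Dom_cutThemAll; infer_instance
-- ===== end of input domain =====

-- B replaces A's destructive pop-loop (which re-sums the list every iteration) by two
-- pointers with a running sum: asymptotically faster, and equivalence here is about the
-- RETURN value only (A mutates its `lengths` argument in place; B does not).

-- ===== PORT A =====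
-- literal port of A: while len > 1, check sum, pop the smaller end (pop(0) → tail, pop() → dropLast)
def cutThemAll (lengths : List Int) (minLength : Int) : String :=
  if h : lengths.length > 1 then
    if lengths.sum < minLength then "Impossible"
    else if (PySem.List.pyGet? lengths 0).getD 0 < (PySem.List.pyGet? lengths (-1)).getD 0 then
      cutThemAll lengths.tail minLength
    else
      cutThemAll lengths.dropLast minLength
  else "Possible"
termination_by lengths.length
decreasing_by
  · simp only [List.length_tail]; omega
  · simp only [List.length_dropLast]; omega

-- ===== PORT B =====
-- the while-loop of Source B: two pointers i, j and running sum s over the unchanged list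
def cutThemAllLoop (xs : List Int) (m : Int) (i j s : Int) : String :=
  if h : i < j then
    if s < m then "Impossible"
    else
      let xi := (PySem.List.pyGet? xs i).getD 0
      let xj := (PySem.List.pyGet? xs j).getD 0
      if xi < xj then cutThemAllLoop xs m (i + 1) j (s - xi)
      else cutThemAllLoop xs m i (j - 1) (s - xj)
  else "Possible"
termination_by (j - i).toNat
decreasing_by
  · omega
  · omega

def cutThemAll_alt (lengths : List Int) (minLength : Int) : String :=
  cutThemAllLoop lengths minLength 0 ((lengths.length : Int) - 1) lengths.sum

-- ===== PRECONDITION & SPEC =====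
def Spec_cutThemAll (lengths : List Int) (minLength : Int) (out : String) : Prop := out = cutThemAll_alt lengths minLength
instance (lengths : List Int) (minLength : Int) (out : String) : Decidable (Spec_cutThemAll lengths minLength out) := by unfold Spec_cutThemAll; infer_instance

-- ===== CLAIM (what is proved, stated in full; the proofs are below) =====
def Claim_equal_cutThemAll : Prop := ∀ (lengths : List Int) (minLength : Int), Dom_cutThemAll lengths minLength → Spec_cutThemAll lengths minLength (cutThemAll lengths minLength)

-- ===== LEMMAS AND PROOFS =====

-- the segment xs[i..i+n] decomposed at its left end
theorem pvSeg_cons (xs : List Int) (i n : Nat) (h : i < xs.length) :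
    (xs.drop i).take (n + 1) = xs[i] :: ((xs.drop (i + 1)).take n) := by
  rw [List.drop_eq_getElem_cons h, List.take_succ_cons]

-- the segment xs[i..i+n] decomposed at its right end
theorem pvSeg_snoc (xs : List Int) (i n : Nat) (h : i + n < xs.length) :
    (xs.drop i).take (n + 1) = (xs.drop i).take n ++ [xs[i + n]] := by
  rw [List.take_succ]
  congr 1
  rw [List.getElem?_drop, List.getElem?_eq_getElem h]
  rfl

-- the loop of B on pointers (i, j) computes A on the segment xs[i..j], given s = its sum
theorem pvKey (fuel : Nat) : ∀ (xs : List Int) (m : Int) (i j : Nat), i ≤ j → j < xs.length →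
    fuel = j - i →
    cutThemAllLoop xs m (i : Int) (j : Int) ((xs.drop i).take (j - i + 1)).sum
      = cutThemAll ((xs.drop i).take (j - i + 1)) m := by
  induction fuel with
  | zero =>
    intro xs m i j hij hj hf
    have hieq : i = j := by omega
    subst hieq
    have hi : i < xs.length := hj
    rw [cutThemAllLoop, cutThemAll]
    have hlen : ((xs.drop i).take (i - i + 1)).length = 1 := by
      simp [List.length_take, List.length_drop]; omega
    simp [hlen]
  | succ f ih =>
    intro xs m i j hij hj hf
    have hilt : i < j := by omega
    have hi : i < xs.length := by omega
    set seg := (xs.drop i).take (j - i + 1) with hseg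
    have hcons : seg = xs[i] :: ((xs.drop (i + 1)).take (j - i)) := by
      rw [hseg]
      have : j - i + 1 = (j - i) + 1 := rfl
      rw [this, pvSeg_cons xs i (j - i) hi]
    have hsnoc : seg = (xs.drop i).take (j - i) ++ [xs[j]] := by
      rw [hseg]
      have h2 : i + (j - i) < xs.length := by omega
      have := pvSeg_snoc xs i (j - i) h2
      simp only [show i + (j - i) = j by omega] at this
      exact this
    have hlen : seg.length = j - i + 1 := by
      rw [hseg]; simp [List.length_take, List.length_drop]; omega
    have hlen1 : seg.length > 1 := by omega
    have hhead : (PySem.List.pyGet? seg 0).getD 0 = xs[i] := by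
      rw [hcons]; simp [PySem.List.pyGet?_zero_cons]
    have hlast : (PySem.List.pyGet? seg (-1)).getD 0 = xs[j] := by
      rw [hsnoc, PySem.List.pyGet?_neg_one_append_singleton]; rfl
    have htail : seg.tail = (xs.drop (i + 1)).take (j - i) := by rw [hcons]; rfl
    have hdropLast : seg.dropLast = (xs.drop i).take (j - i) := by
      rw [hsnoc]; simp
    have hsumL : seg.sum = xs[i] + ((xs.drop (i + 1)).take (j - i)).sum := by
      rw [hcons]; simp
    have hsumR : seg.sum = ((xs.drop i).take (j - i)).sum + xs[j] := by
      rw [hsnoc]; simp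
    have hxi : (PySem.List.pyGet? xs (i : Int)).getD 0 = xs[i] := by
      simp [PySem.List.pyGet?_natCast, List.getElem?_eq_getElem hi]
    have hxj : (PySem.List.pyGet? xs (j : Int)).getD 0 = xs[j] := by
      simp [PySem.List.pyGet?_natCast, List.getElem?_eq_getElem hj]
    rw [cutThemAllLoop, cutThemAll]
    have hij' : (i : Int) < (j : Int) := by exact_mod_cast hilt
    rw [dif_pos hij', dif_pos hlen1]
    by_cases hs : seg.sum < m
    · simp [hs]
    · simp only [if_neg hs, hxi, hxj, hhead, hlast]
      by_cases hcmp : xs[i] < xs[j]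
      · simp only [if_pos hcmp, htail]
        have hrec : ((i : Int) + 1) = ((i + 1 : Nat) : Int) := by push_cast; ring
        rw [hrec]
        have hsum' : seg.sum - xs[i] = ((xs.drop (i + 1)).take (j - i) ).sum := by
          rw [hsumL]; ring
        rw [hsum']
        have : j - i = j - (i + 1) + 1 := by omega
        rw [this]
        exact ih xs m (i + 1) j (by omega) hj (by omega)
      · simp only [if_neg hcmp, hdropLast]
        have hrec : ((j : Int) - 1) = ((j - 1 : Nat) : Int) := by omega
        rw [hrec]
        have hsum' : seg.sum - xs[j] = ((xs.drop i).take (j - i)).sum := by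
          rw [hsumR]; ring
        rw [hsum']
        have : j - i = (j - 1) - i + 1 := by omega
        rw [this]
        exact ih xs m i (j - 1) (by omega) (by omega) (by omega)

-- ===== VERDICT (by name: the statement is the Claim_ definition above) =====
theorem cutThemAll_spec : Claim_equal_cutThemAll := by
  intro xs m _
  unfold Spec_cutThemAll cutThemAll_alt
  rcases Nat.eq_zero_or_pos xs.length with h0 | hpos
  · have hnil : xs = [] := List.eq_nil_of_length_eq_zero h0
    subst hnil
    rw [cutThemAll, cutThemAllLoop]
    simp
  · have hcast : ((xs.length : Int) - 1) = ((xs.length - 1 : Nat) : Int) := by omega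
    rw [hcast]
    have hkey := pvKey (xs.length - 1) xs m 0 (xs.length - 1) (by omega) (by omega) (by omega)
    have hseg : (xs.drop 0).take (xs.length - 1 - 0 + 1) = xs := by
      rw [List.drop_zero, show xs.length - 1 - 0 + 1 = xs.length by omega, List.take_length]
    rw [hseg] at hkey
    push_cast at hkey
    exact hkey.symm
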